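-- pv_equiv track=rewrite | github.com/gamjamyun/HRproject | PythonWorkSpace/functions.py | PeakFilter
-- ===== SOURCE A (Python) =====
-- def PeakFilter(derivative_raw_data,section_range=10):
--     """
--     구간 최대소 차이를 해당 인덱스의 출력 값으로 가짐
--     derivative_raw_data : raw 데이터
--     section_range       : 피크 감도 범위
--     """
--     der2_raw_data = []
--     for i in range(len(derivative_raw_data)-section_range):
--         section_max = 0
--         for j in range(section_range):
--             if derivative_raw_data[i]-derivative_raw_data[i-j]>section_max:
--                 section_max = derivative_raw_data[i]-derivative_raw_data[i-j]
--         der2_raw_data.append(section_max)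
--     return(der2_raw_data)
-- ===== SOURCE B (Python) =====
-- def PeakFilter(derivative_raw_data, section_range=10):
--     # Transposed loops: instead of scanning the whole backward window per index,
--     # iterate once per offset j and combine whole shifted arrays elementwise.
--     data = derivative_raw_data
--     n = len(data)
--     if n <= section_range:
--         return []
--     out = [0] * (n - section_range)
--     for j in range(1, section_range):
--         rot = data[n - j:] + data[:n - j]
--         out = [x if x >= y - r else y - r for x, y, r in zip(out, data, rot)]
--     return out
-- ===== Notes on version B (the rewrite author's own statement) =====
-- stated objective: alternative
-- what changed: Transposed the loop nest: instead of scanning the whole backward window for each output index, B makes one elementwise pass per offset j, combining the data with its rotation by j (slice concatenation) and keeping a running maximum array; the trivial offset j=0 is skipped.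
import Mathlib
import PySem

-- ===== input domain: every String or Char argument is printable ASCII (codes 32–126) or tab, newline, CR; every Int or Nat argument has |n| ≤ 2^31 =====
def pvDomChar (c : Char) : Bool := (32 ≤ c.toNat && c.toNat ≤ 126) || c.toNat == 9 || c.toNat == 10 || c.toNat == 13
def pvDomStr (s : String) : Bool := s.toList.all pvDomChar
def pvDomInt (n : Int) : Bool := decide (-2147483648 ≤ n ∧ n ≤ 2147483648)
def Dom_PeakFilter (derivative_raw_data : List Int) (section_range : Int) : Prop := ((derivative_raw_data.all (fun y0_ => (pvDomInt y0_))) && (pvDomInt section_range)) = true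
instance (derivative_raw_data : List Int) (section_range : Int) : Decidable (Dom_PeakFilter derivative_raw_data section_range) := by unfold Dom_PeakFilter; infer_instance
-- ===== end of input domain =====

-- B transposes A's loops: one pass per offset j combining whole shifted arrays elementwise,
-- instead of a full backward-window scan per output index (alternative decomposition, same values).

-- ===== PORT A =====
-- Python's data[i] / data[i-j] never raise on reachable indices (the inner loop only runs when
-- 0 ≤ i < len - sr and 0 ≤ j < sr, so -len < i-j < len); pyGetD's default 0 is dead code.
def PeakFilter (derivative_raw_data : List Int) (section_range : Int) : List Int :=
  (PySem.List.pyRange 0 ((derivative_raw_data.length : Int) - section_range) 1).foldl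
    (fun acc i =>
      let m := (PySem.List.pyRange 0 section_range 1).foldl
        (fun m j =>
          if PySem.List.pyGetD derivative_raw_data i 0
               - PySem.List.pyGetD derivative_raw_data (i - j) 0 > m then
            PySem.List.pyGetD derivative_raw_data i 0
              - PySem.List.pyGetD derivative_raw_data (i - j) 0
          else m) 0
      acc ++ [m]) []

-- ===== PORT B =====
def PeakFilter_alt (derivative_raw_data : List Int) (section_range : Int) : List Int :=
  let n : Int := derivative_raw_data.length
  if n ≤ section_range then []
  else
    (PySem.List.pyRange 1 section_range 1).foldl
      (fun out j =>
        let rot := PySem.List.slice derivative_raw_data (some (n - j)) none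
                   ++ PySem.List.slice derivative_raw_data none (some (n - j))
        (out.zip (derivative_raw_data.zip rot)).map
          (fun p => if p.1 ≥ p.2.1 - p.2.2 then p.1 else p.2.1 - p.2.2))
      (List.replicate (n - section_range).toNat 0)

-- ===== PRECONDITION & SPEC =====
def Spec_PeakFilter (derivative_raw_data : List Int) (section_range : Int) (out : List Int) : Prop := out = PeakFilter_alt derivative_raw_data section_range
instance (derivative_raw_data : List Int) (section_range : Int) (out : List Int) : Decidable (Spec_PeakFilter derivative_raw_data section_range out) := by unfold Spec_PeakFilter; infer_instance

-- ===== CLAIM (what is proved, stated in full; the proofs are below) =====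
def Claim_equal_PeakFilter : Prop := ∀ (derivative_raw_data : List Int) (section_range : Int), Dom_PeakFilter derivative_raw_data section_range → Spec_PeakFilter derivative_raw_data section_range (PeakFilter derivative_raw_data section_range)

-- ===== LEMMAS AND PROOFS =====

-- A's inner loop as a function of the offset-range bound sr (its value at index i).
def innerA (d : List Int) (sr i : Int) : Int :=
  (PySem.List.pyRange 0 sr 1).foldl
    (fun m j =>
      if PySem.List.pyGetD d i 0 - PySem.List.pyGetD d (i - j) 0 > m then
        PySem.List.pyGetD d i 0 - PySem.List.pyGetD d (i - j) 0
      else m) 0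

-- B's rotated array for offset j.
def rotL (d : List Int) (j : Int) : List Int :=
  PySem.List.slice d (some ((d.length : Int) - j)) none
  ++ PySem.List.slice d none (some ((d.length : Int) - j))

lemma A_eq_map (d : List Int) (sr : Int) :
    PeakFilter d sr
      = (PySem.List.pyRange 0 ((d.length : Int) - sr) 1).map (innerA d sr) := by
  unfold PeakFilter innerA
  exact PySem.List.foldl_append_singleton_eq_map _ _ []

lemma innerA_succ (d : List Int) (i : Int) (m : Nat) :
    innerA d ((m : Int) + 1) i
      = (if PySem.List.pyGetD d i 0 - PySem.List.pyGetD d (i - m) 0 > innerA d (m : Int) i then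
          PySem.List.pyGetD d i 0 - PySem.List.pyGetD d (i - m) 0
        else innerA d (m : Int) i) := by
  unfold innerA
  rw [PySem.List.pyRange_one_succ_right (by positivity), List.foldl_append]
  simp

lemma innerA_le_one (d : List Int) (sr i : Int) (h : sr ≤ 1) : innerA d sr i = 0 := by
  unfold innerA
  rcases lt_or_eq_of_le h with h' | h'
  · rw [PySem.List.pyRange_one_eq_nil (by omega)]; rfl
  · subst h'
    rw [PySem.List.pyRange_one_cons (by omega), PySem.List.pyRange_one_eq_nil (by omega)]
    simp

-- rot is the backward rotation by jn: its entry i is Python's data[i - jn] (negative wrap).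
lemma rot_get (d : List Int) (jn i : Nat) (h1 : 1 ≤ jn) (h2 : i + jn < d.length) :
    (rotL d (jn : Int))[i]? = some (PySem.List.pyGetD d ((i : Int) - (jn : Int)) 0) := by
  unfold rotL
  have hn : jn < d.length := by omega
  rw [PySem.List.slice_from d (by omega), PySem.List.slice_to d (by omega)]
  have hc : (((d.length : Int) - (jn : Int))).toNat = d.length - jn := by omega
  rw [hc]
  by_cases hij : i < jn
  · rw [List.getElem?_append_left (by simp; omega), List.getElem?_drop]
    have he : (i:Int) - (jn:Int) = -(((jn - i : Nat) : Int)) := by omega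
    rw [he, PySem.List.pyGetD_neg_natCast d _ 0 (by omega) (by omega)]
    rw [List.getElem?_eq_getElem (by omega)]
    congr 1
    congr 1
    omega
  · rw [List.getElem?_append_right (by simp; omega)]
    simp only [List.length_drop]
    rw [List.getElem?_take_of_lt (by omega), List.getElem?_eq_getElem (by omega)]
    have he : (i:Int) - (jn:Int) = ((i - jn : Nat) : Int) := by omega
    rw [he, PySem.List.pyGetD_natCast]
    rw [List.getD_eq_getElem?_getD, List.getElem?_eq_getElem (by omega)]
    congr 2
    omega

lemma rot_length (d : List Int) (jn : Nat) (h : jn ≤ d.length) :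
    (rotL d (jn:Int)).length = d.length := by
  unfold rotL
  rw [PySem.List.slice_from d (by omega), PySem.List.slice_to d (by omega)]
  simp

-- One elementwise pass of B at offset jn turns per-index values f into A's inner-loop step.
lemma step_elem (d : List Int) (sr : Int) (f : Int → Int) (jn : Nat) (h1 : 1 ≤ jn)
    (hsr : (jn : Int) < sr) (hn : sr < (d.length : Int)) :
    ((((PySem.List.pyRange 0 ((d.length : Int) - sr) 1).map f).zip
        (d.zip (rotL d (jn : Int)))).map
      (fun p => if p.1 ≥ p.2.1 - p.2.2 then p.1 else p.2.1 - p.2.2))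
    = (PySem.List.pyRange 0 ((d.length : Int) - sr) 1).map
        (fun i => if PySem.List.pyGetD d i 0 - PySem.List.pyGetD d (i - (jn : Int)) 0 > f i then
            PySem.List.pyGetD d i 0 - PySem.List.pyGetD d (i - (jn : Int)) 0
          else f i) := by
  have hjl : jn ≤ d.length := by omega
  have hrl : (rotL d (jn:Int)).length = d.length := rot_length d jn hjl
  apply List.ext_getElem
  · simp [PySem.List.length_pyRange_one, hrl]
    omega
  · intro k hk1 hk2
    simp only [List.getElem_map, List.getElem_zip]
    have hkK : k < ((d.length : Int) - sr).toNat := by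
      simpa [PySem.List.length_pyRange_one] using hk2
    have hkn : k + jn < d.length := by omega
    have hrot : (rotL d (jn:Int))[k]'(by omega) = PySem.List.pyGetD d ((k:Int) - (jn:Int)) 0 := by
      have := rot_get d jn k h1 hkn
      rwa [List.getElem?_eq_getElem (by omega), Option.some_inj] at this
    have hR : (PySem.List.pyRange 0 ((d.length : Int) - sr) 1)[k]'(by
        simp [PySem.List.length_pyRange_one]; omega) = (k : Int) := by
      rw [PySem.List.getElem_pyRange_one]; ring
    have hd : d[k]'(by omega) = PySem.List.pyGetD d ((k:Int)) 0 := by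
      rw [PySem.List.pyGetD_natCast, List.getD_eq_getElem?_getD,
        List.getElem?_eq_getElem (by omega)]
      rfl
    simp only [hrot, hR, hd]
    split_ifs <;> omega

-- B's fold over offsets 1..m equals A's per-index inner loop truncated at m+1.
lemma B_fold_eq (d : List Int) (sr : Int) (hsr : sr < (d.length : Int)) (m : Nat)
    (hm : (m : Int) + 1 ≤ sr) :
    (PySem.List.pyRange 1 ((m : Int) + 1) 1).foldl
      (fun out j =>
        (out.zip (d.zip (rotL d j))).map
          (fun p => if p.1 ≥ p.2.1 - p.2.2 then p.1 else p.2.1 - p.2.2))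
      (List.replicate ((d.length : Int) - sr).toNat 0)
      = (PySem.List.pyRange 0 ((d.length : Int) - sr) 1).map (innerA d ((m : Int) + 1)) := by
  induction m with
  | zero =>
    rw [PySem.List.pyRange_one_eq_nil (by norm_num)]
    simp only [List.foldl_nil, Nat.cast_zero, zero_add]
    have h1 : (PySem.List.pyRange 0 ((d.length : Int) - sr) 1).map (innerA d 1)
        = (PySem.List.pyRange 0 ((d.length : Int) - sr) 1).map (fun _ => (0:Int)) :=
      List.map_congr_left (fun i _ => innerA_le_one d 1 i (by omega))
    rw [h1, List.map_const', PySem.List.length_pyRange_one]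
    norm_num
  | succ p ih =>
    have hp : (p : Int) + 1 ≤ sr := by push_cast at hm; omega
    have hc : ((p + 1 : Nat) : Int) = (p : Int) + 1 := by push_cast; ring
    rw [hc, PySem.List.pyRange_one_succ_right (by omega), List.foldl_append, ih hp]
    simp only [List.foldl_cons, List.foldl_nil]
    have hse := step_elem d sr (innerA d ((p : Int) + 1)) (p + 1) (by omega)
      (by push_cast; omega) hsr
    rw [hc] at hse
    rw [hse]
    apply List.map_congr_left
    intro i _
    have hsucc := innerA_succ d i (p + 1)
    rw [hc] at hsucc
    rw [hsucc]

lemma A_eq_B (d : List Int) (sr : Int) : PeakFilter d sr = PeakFilter_alt d sr := by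
  unfold PeakFilter_alt
  by_cases h : (d.length : Int) ≤ sr
  · rw [if_pos h, A_eq_map, PySem.List.pyRange_one_eq_nil (by omega)]
    rfl
  · rw [if_neg h]
    by_cases h2 : sr ≤ 1
    · rw [PySem.List.pyRange_one_eq_nil (by omega)]
      simp only [List.foldl_nil]
      rw [A_eq_map,
        List.map_congr_left (fun i _ => innerA_le_one d sr i h2),
        List.map_const', PySem.List.length_pyRange_one]
      norm_num
    · have hm : sr = (((sr - 1).toNat : Nat) : Int) + 1 := by omega
      have hB := B_fold_eq d sr (by omega) (sr - 1).toNat (by omega)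
      simp only [rotL] at hB
      rw [A_eq_map]
      rw [hm]
      rw [← hm] at hB ⊢
      exact hB.symm

-- ===== VERDICT (by name: the statement is the Claim_ definition above) =====
theorem PeakFilter_spec : Claim_equal_PeakFilter := by
  intro d sr _
  unfold Spec_PeakFilter
  exact A_eq_B d sr
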